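-- pv_equiv track=rewrite | github.com/SixingYan/Sketch-for-Data-Stream | experiment/experimentQ1.py | gmHash
-- ===== SOURCE A (Python) =====
-- def gmHash(edge, P, h, w, mask):
--     hvList = []
--     for k in range(w):
--         a, b = mask[k][0], mask[k][1]
--         totalI = 0
--         for i in range(len(edge)):
--             # if i=0, edge(t1,t2), then h**(2-1-0) = h
--             totalI += ((a*edge[i]+b)%P%h)*(h**(len(edge)-1-i))
--         hvList.append(totalI)
--     return hvList
-- ===== SOURCE B (Python) =====
-- def gmHash(edge, P, h, w, mask):
--     def hv(row):
--         a, b = row[0], row[1]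
--         total = 0
--         for x in edge:
--             total = total * h + (a * x + b) % P % h
--         return total
--     return [hv(row) for _, row in zip(range(w), mask)]
-- ===== Notes on version B (the rewrite author's own statement) =====
-- stated objective: alternative
-- what changed: The inner power-weighted index sum is replaced by Horner's method (total = total*h + digit) folded directly over the edge elements, and the outer indexed range(w) loop with an append accumulator is replaced by a list comprehension mapping a helper over the first w mask rows (zip(range(w), mask)), so neither h**(len-1-i) powers nor index arithmetic ever occur.
import Mathlib
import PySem

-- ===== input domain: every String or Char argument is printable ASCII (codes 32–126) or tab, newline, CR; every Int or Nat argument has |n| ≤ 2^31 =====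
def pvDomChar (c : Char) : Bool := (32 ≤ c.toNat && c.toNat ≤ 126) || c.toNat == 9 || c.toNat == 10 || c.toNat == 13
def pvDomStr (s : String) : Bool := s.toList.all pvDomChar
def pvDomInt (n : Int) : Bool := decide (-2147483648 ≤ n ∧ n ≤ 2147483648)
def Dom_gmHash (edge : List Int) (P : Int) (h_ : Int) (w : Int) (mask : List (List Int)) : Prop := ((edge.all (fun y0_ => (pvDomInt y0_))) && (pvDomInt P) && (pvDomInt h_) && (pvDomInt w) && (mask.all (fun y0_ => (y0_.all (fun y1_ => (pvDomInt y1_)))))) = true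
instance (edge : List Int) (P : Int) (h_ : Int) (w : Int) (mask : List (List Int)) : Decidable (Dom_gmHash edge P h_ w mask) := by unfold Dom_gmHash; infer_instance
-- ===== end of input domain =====

-- B maps a Horner-style helper (total = total*h + digit, no h**(len-1-i) power, no index
-- arithmetic) over the first w mask rows via zip(range(w), mask), instead of A's indexed
-- range(w) loop appending power-weighted index sums.

-- ===== PORT A =====
def gmHash (edge : List Int) (P : Int) (h_ : Int) (w : Int) (mask : List (List Int)) : List Int :=
  (PySem.List.pyRange 0 w 1).foldl (fun hvList k =>
    let a := PySem.List.pyGetD (PySem.List.pyGetD mask k []) 0 0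
    let b := PySem.List.pyGetD (PySem.List.pyGetD mask k []) 1 0
    let totalI := (PySem.List.pyRange 0 (edge.length : Int) 1).foldl
      (fun t i => t + (PySem.Int.mod (PySem.Int.mod (a * PySem.List.pyGetD edge i 0 + b) P) h_)
                      * h_ ^ (((edge.length : Int) - 1 - i).toNat)) 0
    hvList ++ [totalI]) []

-- ===== PORT B =====
-- helper hv(row) of Source B
def gmHashHv (edge : List Int) (P : Int) (h_ : Int) (row : List Int) : Int :=
  let a := PySem.List.pyGetD row 0 0
  let b := PySem.List.pyGetD row 1 0
  edge.foldl (fun t x => t * h_ + PySem.Int.mod (PySem.Int.mod (a * x + b) P) h_) 0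

def gmHash_alt (edge : List Int) (P : Int) (h_ : Int) (w : Int) (mask : List (List Int)) : List Int :=
  ((PySem.List.pyRange 0 w 1).zip mask).map (fun p => gmHashHv edge P h_ p.2)

-- ===== PRECONDITION & SPEC =====
-- Pre_ excludes exactly the inputs where Python's A raises: a mask row among the first w missing
-- or shorter than 2 (IndexError), or P = 0 / h = 0 (ZeroDivisionError in %) when the inner
-- modular expression actually runs (some row is taken and the edge is non-empty).
def Pre_gmHash (edge : List Int) (P : Int) (h_ : Int) (w : Int) (mask : List (List Int)) : Prop :=
  w ≤ (mask.length : Int) ∧ (∀ row ∈ mask.take w.toNat, 2 ≤ row.length) ∧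
    (0 < w → edge ≠ [] → P ≠ 0 ∧ h_ ≠ 0)
instance (edge : List Int) (P : Int) (h_ : Int) (w : Int) (mask : List (List Int)) : Decidable (Pre_gmHash edge P h_ w mask) := by unfold Pre_gmHash; infer_instance

def pvWitness_gmHash : List Int × Int × Int × Int × List (List Int) := ([1, 2], 7, 5, 1, [[3, 4]])

def Spec_gmHash (edge : List Int) (P : Int) (h_ : Int) (w : Int) (mask : List (List Int)) (out : List Int) : Prop := out = gmHash_alt edge P h_ w mask
instance (edge : List Int) (P : Int) (h_ : Int) (w : Int) (mask : List (List Int)) (out : List Int) : Decidable (Spec_gmHash edge P h_ w mask out) := by unfold Spec_gmHash; infer_instance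

-- ===== CLAIM (what is proved, stated in full; the proofs are below) =====
def Claim_equal_gmHash : Prop := ∀ (edge : List Int) (P : Int) (h_ : Int) (w : Int) (mask : List (List Int)), Dom_gmHash edge P h_ w mask → Pre_gmHash edge P h_ w mask → Spec_gmHash edge P h_ w mask (gmHash edge P h_ w mask)

-- ===== LEMMAS AND PROOFS =====

-- Horner's fold with seed t equals t * h^len plus the 0-seeded fold.
theorem horner_seed (h : Int) (f : Int → Int) :
    ∀ (e : List Int) (t : Int),
      e.foldl (fun t x => t * h + f x) t
        = t * h ^ e.length + e.foldl (fun t x => t * h + f x) 0 := by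
  intro e
  induction e with
  | nil => intro t; simp
  | cons x tl ih =>
    intro t
    simp only [List.foldl_cons, List.length_cons]
    rw [ih (t * h + f x), ih (0 * h + f x)]
    ring

-- A's power-weighted index sum over range(len(edge)) equals B's Horner fold over edge.
theorem power_sum_eq_horner (h : Int) (f : Int → Int) :
    ∀ (e : List Int) (t0 : Int),
      (PySem.List.pyRange 0 (e.length : Int) 1).foldl
        (fun t i => t + f (PySem.List.pyGetD e i 0) * h ^ (((e.length : Int) - 1 - i).toNat)) t0
        = t0 + e.foldl (fun t x => t * h + f x) 0 := by
  intro e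
  induction e with
  | nil => intro t0; simp
  | cons x tl ih =>
    intro t0
    have hcast : ((x :: tl).length : Int) = (tl.length : Int) + 1 := by push_cast [List.length_cons]; ring
    rw [hcast, PySem.List.pyRange_one_cons (by positivity : (0 : Int) < (tl.length : Int) + 1)]
    simp only [List.foldl_cons, zero_add]
    rw [PySem.List.pyRange_one, List.foldl_map]
    rw [PySem.List.foldl_congr_mem _ _
        (fun t (k : Nat) => t + f (PySem.List.pyGetD tl (k : Int) 0) * h ^ (((tl.length : Int) - 1 - (k : Int)).toNat)) _
        (by
          intro acc k hk
          have h1 : (1 : Int) + (k : Int) = ((k + 1 : Nat) : Int) := by push_cast; ring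
          have hexp : ((tl.length : Int) + 1 - 1 - ((k + 1 : Nat) : Int)).toNat
              = ((tl.length : Int) - 1 - (k : Int)).toNat := by push_cast; omega
          simp only [h1, hexp, PySem.List.pyGetD_natCast, List.getD_cons_succ])]
    rw [show (((tl.length : Int) + 1 - 1).toNat) = tl.length from by omega]
    have hback : List.map (fun k : Nat => (k : Int)) (List.range tl.length)
        = PySem.List.pyRange 0 (tl.length : Int) 1 := by
      rw [PySem.List.pyRange_one]; simp
    have hfold := List.foldl_map (f := fun k : Nat => (k : Int))
      (g := fun t i => t + f (PySem.List.pyGetD tl i 0) * h ^ (((tl.length : Int) - 1 - i).toNat))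
      (l := List.range tl.length)
      (init := t0 + f (PySem.List.pyGetD (x :: tl) 0 0) * h ^ (((tl.length : Int) + 1 - 1 - 0).toNat))
    rw [hback] at hfold
    rw [← hfold, ih]
    have hx : PySem.List.pyGetD (x :: tl) 0 0 = x := by
      simp [PySem.List.pyGetD_ofNat']
    have hxp : (((tl.length : Int) + 1 - 1 - 0).toNat) = tl.length := by omega
    rw [hx, hxp]
    simp only [zero_mul, zero_add]
    rw [horner_seed h f tl (f x)]
    ring

-- ===== VERDICT (by name: the statement is the Claim_ definition above) =====
theorem gmHash_spec : Claim_equal_gmHash := by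
  intro edge P h_ w mask _ hpre
  obtain ⟨hw, -, -⟩ := hpre
  unfold Spec_gmHash gmHash gmHash_alt
  rw [PySem.List.foldl_append_singleton_eq_map, List.nil_append]
  have hlen : (PySem.List.pyRange 0 w 1).length ≤ mask.length := by
    rw [PySem.List.length_pyRange_one]; omega
  apply List.ext_getElem
  · simp [List.length_zip]; omega
  · intro i hi1 hi2
    simp only [List.getElem_map, List.getElem_zip]
    have hirange : i < (PySem.List.pyRange 0 w 1).length := by
      simpa using hi1
    have himask : i < mask.length := lt_of_lt_of_le hirange hlen
    have hk : (PySem.List.pyRange 0 w 1)[i] = (0 : Int) + i :=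
      PySem.List.getElem_pyRange_one (k := i) (h := hirange)
    have hget : PySem.List.pyGetD mask ((PySem.List.pyRange 0 w 1)[i]'hirange) [] = mask[i] := by
      rw [hk]
      have := PySem.List.pyGetD_natCast mask i []
      simp only [show (0 : Int) + (i : Int) = (i : Int) from by ring, this,
        List.getD_eq_getElem mask [] himask]
    rw [hget]
    rw [power_sum_eq_horner h_
      (fun x => PySem.Int.mod (PySem.Int.mod ((PySem.List.pyGetD mask[i] 0 0) * x + (PySem.List.pyGetD mask[i] 1 0)) P) h_)
      edge 0]
    rw [zero_add]
    rfl
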